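-- pv_equiv track=rewrite | github.com/Smurf/pygvariant | src/pygvariant/GVariantConverter.py | _preprocess_gvariant_string
-- ===== SOURCE A (Python) =====
-- def _preprocess_gvariant_string(value_str: str) -> str:
--     """
--     Transforms a GVariant text format string into a Python-compatible
--     literal string by carefully handling variant markers.
--     """
--     s = value_str.replace('true', 'True').replace('false', 'False')
--     if s.lower() == 'nothing':
--         return 'None'
--
--     # A more robust way to handle variants without corrupting string literals.
--     # This parser iterates through the string, keeping track of whether it's
--     # inside a string literal.
--
--     res = []
--     in_string = False
--     quote_char = ''
--     i = 0
--     while i < len(s):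
--         char = s[i]
--         if in_string:
--             res.append(char)
--             if char == '\\': # Handle escaped quotes
--                 if i + 1 < len(s):
--                     res.append(s[i+1])
--                     i += 1
--             elif char == quote_char:
--                 in_string = False
--         elif char in "\"'":
--             res.append(char)
--             in_string = True
--             quote_char = char
--         elif char not in "<>":
--             res.append(char)
--         # Variants are just ignored, not added to res
--         i += 1
--
--     return "".join(res)
-- ===== SOURCE B (Python) =====
-- def _take_literal(s, q, i):
--     """Return the index just past the string literal opened with quote q,
--     starting the scan at i (after the opening quote)."""
--     n = len(s)
--     while i < n:
--         c = s[i]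
--         if c == '\\':
--             i += 2
--         elif c == q:
--             return i + 1
--         else:
--             i += 1
--     return n
--
--
-- def _preprocess_gvariant_string(value_str: str) -> str:
--     s = value_str.replace('true', 'True').replace('false', 'False')
--     if s.lower() == 'nothing':
--         return 'None'
--     res = []
--     i = 0
--     n = len(s)
--     while i < n:
--         c = s[i]
--         if c in "\"'":
--             j = _take_literal(s, c, i + 1)
--             res.append(s[i:j])
--             i = j
--         else:
--             if c not in "<>":
--                 res.append(c)
--             i += 1
--     return "".join(res)
-- ===== Notes on version B (the rewrite author's own statement) =====
-- stated objective: simpler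
-- what changed: Replaces the single while-loop with an in_string/quote_char flag state machine by a two-level scan: a helper consumes an entire quoted literal at once and the main loop appends that whole slice, so no string-state flags are carried.
import Mathlib
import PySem

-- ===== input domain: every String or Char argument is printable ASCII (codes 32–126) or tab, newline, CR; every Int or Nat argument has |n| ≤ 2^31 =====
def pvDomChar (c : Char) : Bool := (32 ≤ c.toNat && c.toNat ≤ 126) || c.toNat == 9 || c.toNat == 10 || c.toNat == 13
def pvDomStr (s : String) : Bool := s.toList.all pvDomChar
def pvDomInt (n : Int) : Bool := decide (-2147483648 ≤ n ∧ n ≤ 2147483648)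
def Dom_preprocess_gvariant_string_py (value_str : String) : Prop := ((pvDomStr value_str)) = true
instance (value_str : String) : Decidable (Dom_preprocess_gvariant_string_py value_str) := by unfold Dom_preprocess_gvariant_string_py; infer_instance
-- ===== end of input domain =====

-- B replaces A's single while-loop with an in_string/quote_char flag state machine by a
-- two-level decomposition: a helper consumes a whole quoted literal at once (objective: simpler).

-- ===== PORT A =====
-- A's while-loop: remaining characters, accumulated res, in_string flag, quote_char.
def pvLoopA : List Char → List Char → Bool → Char → List Char
  | [], res, _, _ => res
  | c :: rest, res, in_string, q =>
    if in_string then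
      if c == '\\' then
        match rest with
        | [] => pvLoopA [] (res ++ [c]) true q          -- i + 1 < len(s) is false: only the backslash is appended
        | d :: rest' => pvLoopA rest' (res ++ [c, d]) true q
      else if c == q then pvLoopA rest (res ++ [c]) false q
      else pvLoopA rest (res ++ [c]) true q
    else if c == '"' || c == '\'' then pvLoopA rest (res ++ [c]) true c
    else if c == '<' || c == '>' then pvLoopA rest res false q   -- variants dropped
    else pvLoopA rest (res ++ [c]) false q

def preprocess_gvariant_string_py (value_str : String) : String :=
  let s := PySem.Str.replace (PySem.Str.replace value_str "true" "True") "false" "False"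
  if PySem.Str.lower s == "nothing" then "None"
  else String.ofList (pvLoopA s.toList [] false ' ')  -- quote_char starts as '' in Python; it is never read before being set, ' ' is a placeholder

-- ===== PORT B =====
-- Source B's _take_literal: consume a quoted literal (opened with q), returning (consumed chars, remainder).
def pvTakeLit (q : Char) : List Char → List Char × List Char
  | [] => ([], [])
  | c :: rest =>
    if c == '\\' then
      match rest with
      | [] => (['\\'], [])                              -- i += 2 runs past the end: the lone backslash is kept
      | d :: rest' => let p := pvTakeLit q rest'; ('\\' :: d :: p.1, p.2)
    else if c == q then ([c], rest)
    else let p := pvTakeLit q rest; (c :: p.1, p.2)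

theorem pvTakeLit_snd_length (q : Char) : ∀ s : List Char, (pvTakeLit q s).2.length ≤ s.length
  | [] => by simp [pvTakeLit]
  | c :: rest => by
    unfold pvTakeLit
    split_ifs with h1 h2
    · match rest with
      | [] => simp
      | d :: rest' =>
        have := pvTakeLit_snd_length q rest'
        simp; omega
    · simp
    · have := pvTakeLit_snd_length q rest
      simp; omega

-- Source B's main loop: on a quote, hand off to _take_literal and append the whole slice.
def pvGo : List Char → List Char
  | [] => []
  | c :: rest =>
    if c == '"' || c == '\'' then
      let p := pvTakeLit c rest
      c :: (p.1 ++ pvGo p.2)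
    else if c == '<' || c == '>' then pvGo rest
    else c :: pvGo rest
termination_by s => s.length
decreasing_by
  · have := pvTakeLit_snd_length c rest; simp; omega
  · simp
  · simp

def preprocess_gvariant_string_py_alt (value_str : String) : String :=
  let s := PySem.Str.replace (PySem.Str.replace value_str "true" "True") "false" "False"
  if PySem.Str.lower s == "nothing" then "None"
  else String.ofList (pvGo s.toList)

-- ===== PRECONDITION & SPEC =====
def Spec_preprocess_gvariant_string_py (value_str : String) (out : String) : Prop := out = preprocess_gvariant_string_py_alt value_str
instance (value_str : String) (out : String) : Decidable (Spec_preprocess_gvariant_string_py value_str out) := by unfold Spec_preprocess_gvariant_string_py; infer_instance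

-- ===== CLAIM (what is proved, stated in full; the proofs are below) =====
def Claim_equal_preprocess_gvariant_string_py : Prop := ∀ (value_str : String), Dom_preprocess_gvariant_string_py value_str → Spec_preprocess_gvariant_string_py value_str (preprocess_gvariant_string_py value_str)

-- ===== LEMMAS AND PROOFS =====

-- Main invariant: A's flag machine equals B's two-level scan, in both flag states.
theorem pvMain : ∀ n : Nat, ∀ s : List Char, s.length ≤ n →
    (∀ res q, pvLoopA s res false q = res ++ pvGo s) ∧
    (∀ res q, pvLoopA s res true q = res ++ (pvTakeLit q s).1 ++ pvGo (pvTakeLit q s).2) := by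
  intro n
  induction n with
  | zero =>
    intro s hs
    have : s = [] := List.eq_nil_of_length_eq_zero (Nat.le_zero.mp hs)
    subst this
    simp [pvLoopA.eq_def, pvGo, pvTakeLit]
  | succ n ih =>
    intro s hs
    match s with
    | [] => simp [pvLoopA.eq_def, pvGo, pvTakeLit]
    | c :: rest =>
      have hrest : rest.length ≤ n := by simp at hs; omega
      constructor
      · intro res q
        by_cases hq : (c == '"' || c == '\'') = true
        · rw [show pvLoopA (c :: rest) res false q = pvLoopA rest (res ++ [c]) true c by
            rw [pvLoopA.eq_def]; simp [hq]]
          rw [(ih rest hrest).2 (res ++ [c]) c]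
          rw [show pvGo (c :: rest) = c :: ((pvTakeLit c rest).1 ++ pvGo (pvTakeLit c rest).2) by
            rw [pvGo.eq_def]; simp [hq]]
          simp
        · by_cases hv : (c == '<' || c == '>') = true
          · rw [show pvLoopA (c :: rest) res false q = pvLoopA rest res false q by
              rw [pvLoopA.eq_def]; simp [hq, hv]]
            rw [(ih rest hrest).1 res q]
            rw [show pvGo (c :: rest) = pvGo rest by rw [pvGo.eq_def]; simp [hq, hv]]
          · rw [show pvLoopA (c :: rest) res false q = pvLoopA rest (res ++ [c]) false q by
              rw [pvLoopA.eq_def]; simp [hq, hv]]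
            rw [(ih rest hrest).1 (res ++ [c]) q]
            rw [show pvGo (c :: rest) = c :: pvGo rest by rw [pvGo.eq_def]; simp [hq, hv]]
            simp
      · intro res q
        by_cases hb : (c == '\\') = true
        · match rest with
          | [] =>
            rw [show pvLoopA (c :: []) res true q = pvLoopA [] (res ++ [c]) true q by
              rw [pvLoopA.eq_def]; simp [hb]]
            have hc : c = '\\' := by simpa using hb
            subst hc
            rw [pvLoopA.eq_def]; simp [pvTakeLit, pvGo]
          | d :: rest' =>
            have hr' : rest'.length ≤ n := by simp at hs; omega
            rw [show pvLoopA (c :: d :: rest') res true q = pvLoopA rest' (res ++ [c, d]) true q by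
              rw [pvLoopA.eq_def]; simp [hb]]
            rw [(ih rest' hr').2 (res ++ [c, d]) q]
            have hc : c = '\\' := by simpa using hb
            subst hc
            rw [show pvTakeLit q ('\\' :: d :: rest')
                  = ('\\' :: d :: (pvTakeLit q rest').1, (pvTakeLit q rest').2) by
              rw [pvTakeLit.eq_def]; simp]
            simp
        · by_cases hc : (c == q) = true
          · rw [show pvLoopA (c :: rest) res true q = pvLoopA rest (res ++ [c]) false q by
              rw [pvLoopA.eq_def]; simp [hb, hc]]
            rw [(ih rest hrest).1 (res ++ [c]) q]
            rw [show pvTakeLit q (c :: rest) = ([c], rest) by rw [pvTakeLit.eq_def]; simp [hb, hc]]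
          · rw [show pvLoopA (c :: rest) res true q = pvLoopA rest (res ++ [c]) true q by
              rw [pvLoopA.eq_def]; simp [hb, hc]]
            rw [(ih rest hrest).2 (res ++ [c]) q]
            rw [show pvTakeLit q (c :: rest)
                  = (c :: (pvTakeLit q rest).1, (pvTakeLit q rest).2) by
              rw [pvTakeLit.eq_def]; simp [hb, hc]]
            simp

-- ===== VERDICT (by name: the statement is the Claim_ definition above) =====
theorem preprocess_gvariant_string_py_spec : Claim_equal_preprocess_gvariant_string_py := by
  intro value_str _
  unfold Spec_preprocess_gvariant_string_py preprocess_gvariant_string_py preprocess_gvariant_string_py_alt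
  set s := PySem.Str.replace (PySem.Str.replace value_str "true" "True") "false" "False" with hs
  by_cases h : (PySem.Str.lower s == "nothing") = true
  · simp [h]
  · simp only [h, Bool.false_eq_true, if_false]
    have := (pvMain s.toList.length s.toList (le_refl _)).1 [] ' '
    simp at this
    rw [this]
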